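-- pv_equiv track=rewrite | github.com/AKANEMO22/btvn | 3 game/import sys.py | numWrongPlaceMatches
-- ===== SOURCE A (Python) =====
-- def numWrongPlaceMatches(secret_remaining, guess_remaining):
--
--     imperfect_matches = 0
--
--     secret_counts = {}
--     for peg in secret_remaining:
--         secret_counts[peg] = secret_counts.get(peg, 0) + 1
--
--
--     for peg in guess_remaining:
--
--         if peg in secret_counts and secret_counts[peg] > 0:
--             imperfect_matches += 1
--             secret_counts[peg] -= 1
--
--     return imperfect_matches
-- ===== SOURCE B (Python) =====
-- def numWrongPlaceMatches(secret_remaining, guess_remaining):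
--     # symmetric frequency tables; the answer is the sum of elementwise minima
--     secret_counts = {}
--     for peg in secret_remaining:
--         secret_counts[peg] = secret_counts.get(peg, 0) + 1
--     guess_counts = {}
--     for peg in guess_remaining:
--         guess_counts[peg] = guess_counts.get(peg, 0) + 1
--     return sum(min(n, secret_counts.get(peg, 0)) for peg, n in guess_counts.items())
-- ===== Notes on version B (the rewrite author's own statement) =====
-- stated objective: alternative
-- what changed: Replaces A's consuming scan (decrementing a secret frequency dict while walking guess) with a symmetric build of both frequency tables followed by a sum of elementwise minima over the distinct guess pegs.
import Mathlib
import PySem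

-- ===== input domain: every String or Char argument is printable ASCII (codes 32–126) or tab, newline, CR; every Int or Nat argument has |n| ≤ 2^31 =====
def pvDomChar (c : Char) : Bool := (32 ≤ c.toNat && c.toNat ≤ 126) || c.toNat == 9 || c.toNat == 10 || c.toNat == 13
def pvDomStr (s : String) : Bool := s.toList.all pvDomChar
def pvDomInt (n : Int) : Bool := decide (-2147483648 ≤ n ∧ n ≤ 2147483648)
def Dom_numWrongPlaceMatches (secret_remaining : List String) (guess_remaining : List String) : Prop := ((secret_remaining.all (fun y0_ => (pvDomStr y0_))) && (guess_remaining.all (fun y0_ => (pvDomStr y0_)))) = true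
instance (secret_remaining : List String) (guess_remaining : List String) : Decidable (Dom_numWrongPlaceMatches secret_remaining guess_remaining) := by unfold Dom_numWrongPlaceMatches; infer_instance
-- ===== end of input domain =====

-- B replaces A's consuming decrement-scan by two symmetric frequency tables and a
-- sum of elementwise minima; objective: alternative (same cost, different shape).

-- ===== PORT A =====
def numWrongPlaceMatches (secret_remaining : List String) (guess_remaining : List String) : Int :=
  let secret_counts : PySem.Dict String Int :=
    secret_remaining.foldl (fun d peg => d.insert peg (d.getD peg 0 + 1)) PySem.Dict.empty
  (guess_remaining.foldl
    (fun (st : Int × PySem.Dict String Int) peg =>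
      if st.2.contains peg ∧ st.2.getD peg 0 > 0 then
        (st.1 + 1, st.2.insert peg (st.2.getD peg 0 - 1))
      else st)
    (0, secret_counts)).1

-- ===== PORT B =====
def numWrongPlaceMatches_alt (secret_remaining : List String) (guess_remaining : List String) : Int :=
  let secret_counts : PySem.Dict String Int :=
    secret_remaining.foldl (fun d peg => d.insert peg (d.getD peg 0 + 1)) PySem.Dict.empty
  let guess_counts : PySem.Dict String Int :=
    guess_remaining.foldl (fun d peg => d.insert peg (d.getD peg 0 + 1)) PySem.Dict.empty
  (guess_counts.items.map (fun kv => min kv.2 (secret_counts.getD kv.1 0))).sum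

-- ===== PRECONDITION & SPEC =====
def Spec_numWrongPlaceMatches (secret_remaining : List String) (guess_remaining : List String) (out : Int) : Prop := out = numWrongPlaceMatches_alt secret_remaining guess_remaining
instance (secret_remaining : List String) (guess_remaining : List String) (out : Int) : Decidable (Spec_numWrongPlaceMatches secret_remaining guess_remaining out) := by unfold Spec_numWrongPlaceMatches; infer_instance

-- ===== CLAIM (what is proved, stated in full; the proofs are below) =====
def Claim_equal_numWrongPlaceMatches : Prop := ∀ (secret_remaining : List String) (guess_remaining : List String), Dom_numWrongPlaceMatches secret_remaining guess_remaining → Spec_numWrongPlaceMatches secret_remaining guess_remaining (numWrongPlaceMatches secret_remaining guess_remaining)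

-- ===== LEMMAS AND PROOFS =====

-- a dict that does not contain the key returns the default
theorem pv_getD_of_not_contains (d : PySem.Dict String Int) (k : String)
    (h : d.contains k = false) : d.getD k 0 = 0 := by
  have h2 : d.get? k = none := by
    have := PySem.Dict.contains_eq_isSome_get? (d := d) (k := k)
    rw [h] at this
    cases hg : d.get? k with
    | none => rfl
    | some v => rw [hg] at this; simp at this
  simp [PySem.Dict.getD, h2]

-- the guard of A's loop fires iff the stored count is positive
theorem pv_guard_iff (d : PySem.Dict String Int) (k : String) :
    ((d.contains k = true) ∧ d.getD k 0 > 0) ↔ d.getD k 0 > 0 := by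
  constructor
  · rintro ⟨_, h⟩; exact h
  · intro h
    refine ⟨?_, h⟩
    cases hc : d.contains k with
    | false => have := pv_getD_of_not_contains d k hc; omega
    | true => rfl

-- invariant of A's second loop, generalized over accumulator and dict
theorem pv_loopA (g : List String) : ∀ (m : Int) (d : PySem.Dict String Int),
    (g.foldl
      (fun (st : Int × PySem.Dict String Int) peg =>
        if st.2.contains peg ∧ st.2.getD peg 0 > 0 then
          (st.1 + 1, st.2.insert peg (st.2.getD peg 0 - 1))
        else st)
      (m, d)).1
    = m + ∑ x ∈ g.toFinset, min (max (d.getD x 0) 0) (g.count x : Int) := by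
  induction g with
  | nil => intro m d; simp
  | cons p rest ih =>
    intro m d
    have hcnt_ne : ∀ x : String, x ≠ p → ((p :: rest).count x : Int) = (rest.count x : Int) := by
      intro x hx
      rw [List.count_cons]
      simp [Ne.symm hx]
    have hcnt_p : ((p :: rest).count p : Int) = (rest.count p : Int) + 1 := by
      rw [List.count_cons]
      simp
    by_cases hp : d.getD p 0 > 0
    · have hguard : (d.contains p = true) ∧ d.getD p 0 > 0 := (pv_guard_iff d p).2 hp
      simp only [List.foldl_cons, if_pos hguard]
      rw [ih]
      set d' := d.insert p (d.getD p 0 - 1) with hd'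
      have hgetD' : ∀ x, d'.getD x 0 = if p = x then d.getD p 0 - 1 else d.getD x 0 := by
        intro x
        by_cases hx : p = x
        · subst hx; simp [hd']
        · rw [hd', PySem.Dict.getD_insert, if_neg (fun h => hx h.symm), if_neg hx]
      by_cases hmem : p ∈ rest.toFinset
      · have hT : (p :: rest).toFinset = rest.toFinset := by
          rw [List.toFinset_cons, Finset.insert_eq_self.2 hmem]
        rw [hT]
        rw [← Finset.add_sum_erase _ _ hmem, ← Finset.add_sum_erase _ _ hmem]
        have hrest : ∑ x ∈ rest.toFinset.erase p, min (max (d'.getD x 0) 0) (rest.count x : Int)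
            = ∑ x ∈ rest.toFinset.erase p, min (max (d.getD x 0) 0) ((p :: rest).count x : Int) := by
          apply Finset.sum_congr rfl
          intro x hx
          have hxp : x ≠ p := (Finset.mem_erase.1 hx).1
          rw [hgetD' x, if_neg (Ne.symm hxp), hcnt_ne x hxp]
        rw [hrest, hgetD' p, if_pos rfl, hcnt_p]
        omega
      · have hT : (p :: rest).toFinset = insert p rest.toFinset := by
          simp [List.toFinset_cons]
        rw [hT, Finset.sum_insert hmem]
        have hrest : ∑ x ∈ rest.toFinset, min (max (d'.getD x 0) 0) (rest.count x : Int)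
            = ∑ x ∈ rest.toFinset, min (max (d.getD x 0) 0) ((p :: rest).count x : Int) := by
          apply Finset.sum_congr rfl
          intro x hx
          have hxp : x ≠ p := fun h => hmem (h ▸ hx)
          rw [hgetD' x, if_neg (Ne.symm hxp), hcnt_ne x hxp]
        rw [hrest]
        have hc0 : rest.count p = 0 := by
          rw [List.count_eq_zero]
          intro h; exact hmem (List.mem_toFinset.2 h)
        rw [hcnt_p, hc0]
        push_cast
        omega
    · have hguard : ¬ ((d.contains p = true) ∧ d.getD p 0 > 0) := fun h => hp ((pv_guard_iff d p).1 h)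
      simp only [List.foldl_cons, if_neg hguard]
      rw [ih]
      have hmax : max (d.getD p 0) 0 = 0 := by omega
      by_cases hmem : p ∈ rest.toFinset
      · have hT : (p :: rest).toFinset = rest.toFinset := by
          rw [List.toFinset_cons, Finset.insert_eq_self.2 hmem]
        rw [hT]
        apply congrArg (m + ·)
        apply Finset.sum_congr rfl
        intro x hx
        by_cases hxp : x = p
        · subst hxp; rw [hmax, hcnt_p]; omega
        · rw [hcnt_ne x hxp]
      · have hT : (p :: rest).toFinset = insert p rest.toFinset := by
          simp [List.toFinset_cons]
        rw [hT, Finset.sum_insert hmem, hmax]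
        have hrest : ∑ x ∈ rest.toFinset, min (max (d.getD x 0) 0) (rest.count x : Int)
            = ∑ x ∈ rest.toFinset, min (max (d.getD x 0) 0) ((p :: rest).count x : Int) := by
          apply Finset.sum_congr rfl
          intro x hx
          have hxp : x ≠ p := fun h => hmem (h ▸ hx)
          rw [hcnt_ne x hxp]
        rw [hrest, hcnt_p]
        have h0 : min (0 : Int) ((rest.count p : Int) + 1) = 0 := by
          have : (0 : Int) ≤ (rest.count p : Int) + 1 := by positivity
          omega
        rw [h0, zero_add]

-- A's first loop is the counter: its getD is the list count
theorem pv_secret_getD (s : List String) (x : String) :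
    (s.foldl (fun d peg => d.insert peg (d.getD peg 0 + 1)) PySem.Dict.empty).getD x 0
      = (s.count x : Int) := by
  rw [PySem.Dict.getD_foldl_insert_add_one]
  simp

-- B's sum over the guess-counter items is the Finset sum of the minima
theorem pv_alt_eq_sum (s g : List String) :
    numWrongPlaceMatches_alt s g
      = ∑ x ∈ g.toFinset, min ((s.count x : Int)) ((g.count x : Int)) := by
  unfold numWrongPlaceMatches_alt
  rw [PySem.Dict.foldl_insert_getD_add_one_eq_counter,
      PySem.Dict.foldl_insert_getD_add_one_eq_counter]
  dsimp only
  rw [PySem.Dict.items_counter, List.map_map]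
  have hterm : ((fun kv : String × Int => min kv.2 ((PySem.Dict.counter s).getD kv.1 0)) ∘
        fun k => (k, (g.count k : Int)))
      = fun k => min ((s.count k : Int)) ((g.count k : Int)) := by
    funext k
    simp [PySem.Dict.getD_counter, min_comm]
  rw [hterm]
  have hnd : (PySem.Set.ofList g).Nodup := PySem.Set.nodup_ofList g
  have hfs : (PySem.Set.ofList g).toFinset = g.toFinset := by
    ext x
    simp [List.mem_toFinset, PySem.Set.mem_ofList]
  rw [← List.sum_toFinset _ hnd, hfs]

-- ===== VERDICT (by name: the statement is the Claim_ definition above) =====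
theorem numWrongPlaceMatches_spec : Claim_equal_numWrongPlaceMatches := by
  intro s g _
  show numWrongPlaceMatches s g = numWrongPlaceMatches_alt s g
  unfold numWrongPlaceMatches
  rw [pv_loopA, pv_alt_eq_sum]
  rw [zero_add]
  apply Finset.sum_congr rfl
  intro x _
  rw [pv_secret_getD]
  have : (0 : Int) ≤ (s.count x : Int) := by positivity
  rw [max_eq_left this]
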